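-- pv_equiv track=rewrite | github.com/bgadade/ATIG_QC_Automation | pdf2Html/pgApiFunctions.py | getNonTableRegions
-- ===== SOURCE A (Python) =====
-- def getNonTableRegions(diTbl,numPages,pgNum):
--     tmp = {pg: sorted([tbl[3] for tbl in tblTuple],key=lambda tup:tup[1])for pg, tblTuple in diTbl.items()}
--
--     nonTableRegions={}
--     for pg,lstTblRgn in tmp.items():
--         lstNonTblRgn=[]
--         minY=0
--         for tblRgn in lstTblRgn:
--             if not lstNonTblRgn:
--                 lstNonTblRgn.append((0,max(0,minY-1),612,min(792,tblRgn[1]+1)))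
--                 minY=tblRgn[3]
--                 continue
--             lstNonTblRgn.append((0, max(0,minY-1), 612, min(792,tblRgn[1]+1)))
--             minY = tblRgn[3]
--         lstNonTblRgn.append((0, max(0,minY-1), 612, 792))
--         nonTableRegions[pg]=lstNonTblRgn
--     if pgNum==None:
--         nonTableRegions.update({pg:[(0, 0, 612, 792)] for pg in range(1,numPages+1) if pg not in diTbl.keys()})
--     else:
--         if pgNum not in diTbl.keys():
--             nonTableRegions.update({pgNum: [(0, 0, 612, 792)]})
--     return nonTableRegions
-- ===== SOURCE B (Python) =====
-- def getNonTableRegions(diTbl, numPages, pgNum):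
--     def cut(pb, rects):
--         if not rects:
--             return [(0, max(0, pb - 1), 612, 792)]
--         r = rects[0]
--         return [(0, max(0, pb - 1), 612, min(792, r[1] + 1))] + cut(r[3], rects[1:])
--
--     out = {pg: cut(0, sorted((t[3] for t in tbls), key=lambda r: r[1]))
--            for pg, tbls in diTbl.items()}
--     fill = range(1, numPages + 1) if pgNum is None else [pgNum]
--     out.update({pg: [(0, 0, 612, 792)] for pg in fill if pg not in diTbl})
--     return out
-- ===== Notes on version B (the rewrite author's own statement) =====
-- stated objective: simpler
-- what changed: The per-page computation is rewritten as a self-contained recursion on the sorted rectangle list (each call emits one strip and recurses with the current bottom), removing A's threaded minY accumulator, list-append state and redundant first-iteration branch; the two fill-in branches are unified into a single 'fill' page list consumed by one comprehension.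
import Mathlib
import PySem

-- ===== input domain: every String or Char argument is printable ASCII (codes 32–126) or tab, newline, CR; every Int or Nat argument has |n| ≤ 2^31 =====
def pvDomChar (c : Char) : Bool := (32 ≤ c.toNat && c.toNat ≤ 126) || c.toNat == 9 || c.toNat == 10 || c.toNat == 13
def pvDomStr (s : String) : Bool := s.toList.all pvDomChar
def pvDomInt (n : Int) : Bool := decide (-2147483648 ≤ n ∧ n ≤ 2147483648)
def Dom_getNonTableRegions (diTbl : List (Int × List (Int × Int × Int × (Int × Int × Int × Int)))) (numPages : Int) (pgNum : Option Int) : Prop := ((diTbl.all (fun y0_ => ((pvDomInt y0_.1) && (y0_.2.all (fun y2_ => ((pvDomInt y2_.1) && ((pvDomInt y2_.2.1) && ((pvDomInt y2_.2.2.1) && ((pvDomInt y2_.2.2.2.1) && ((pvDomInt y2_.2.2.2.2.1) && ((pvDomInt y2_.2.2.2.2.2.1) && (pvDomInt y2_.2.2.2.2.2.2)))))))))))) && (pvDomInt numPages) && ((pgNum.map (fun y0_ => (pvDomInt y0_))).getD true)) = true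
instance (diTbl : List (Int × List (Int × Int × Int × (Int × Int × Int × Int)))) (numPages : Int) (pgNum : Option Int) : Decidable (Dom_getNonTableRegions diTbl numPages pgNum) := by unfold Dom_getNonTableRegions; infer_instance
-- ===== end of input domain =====

-- B replaces A's threaded minY/list accumulator loop by a self-contained recursion over the sorted
-- rectangles and unifies the two page fill-in branches into one 'fill' list; objective: simpler.

-- ===== PORT A =====
-- inner loop of A: threads (lstNonTblRgn, minY) through the sorted table regions, then appends the final strip
def pvAInner (lst : List (Int × Int × Int × Int)) : List (Int × Int × Int × Int) :=
  let st := lst.foldl (fun (st : List (Int × Int × Int × Int) × Int) r =>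
      if st.1.isEmpty then
        (st.1 ++ [(0, max 0 (st.2 - 1), 612, min 792 (r.2.1 + 1))], r.2.2.2)
      else
        (st.1 ++ [(0, max 0 (st.2 - 1), 612, min 792 (r.2.1 + 1))], r.2.2.2)) ([], 0)
  st.1 ++ [(0, max 0 (st.2 - 1), 612, 792)]

def getNonTableRegions (diTbl : List (Int × List (Int × Int × Int × (Int × Int × Int × Int)))) (numPages : Int) (pgNum : Option Int) : List (Int × List (Int × Int × Int × Int)) :=
  let tmp := diTbl.map (fun kv => (kv.1, PySem.List.sorted (kv.2.map (fun t => t.2.2.2)) (fun tup => tup.2.1) false))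
  let nonTableRegions := tmp.map (fun kv => (kv.1, pvAInner kv.2))
  match pgNum with
  | none => nonTableRegions ++ (PySem.List.pyRange 1 (numPages + 1) 1).filterMap
      (fun pg => if diTbl.any (fun kv => kv.1 == pg) then none else some (pg, [((0 : Int), (0 : Int), (612 : Int), (792 : Int))]))
  | some p =>
      if diTbl.any (fun kv => kv.1 == p) then nonTableRegions
      else nonTableRegions ++ [(p, [((0 : Int), (0 : Int), (612 : Int), (792 : Int))])]

-- ===== PORT B =====
-- B's recursion: emit one strip per call, recurse with the current rectangle's bottom
def pvCut (pb : Int) : List (Int × Int × Int × Int) → List (Int × Int × Int × Int)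
  | [] => [(0, max 0 (pb - 1), 612, 792)]
  | r :: rest => (0, max 0 (pb - 1), 612, min 792 (r.2.1 + 1)) :: pvCut r.2.2.2 rest

def getNonTableRegions_alt (diTbl : List (Int × List (Int × Int × Int × (Int × Int × Int × Int)))) (numPages : Int) (pgNum : Option Int) : List (Int × List (Int × Int × Int × Int)) :=
  let out := diTbl.map (fun kv =>
      (kv.1, pvCut 0 (PySem.List.sorted (kv.2.map (fun t => t.2.2.2)) (fun r => r.2.1) false)))
  let fill := match pgNum with
    | none => PySem.List.pyRange 1 (numPages + 1) 1
    | some p => [p]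
  out ++ fill.filterMap
      (fun pg => if diTbl.any (fun kv => kv.1 == pg) then none else some (pg, [((0 : Int), (0 : Int), (612 : Int), (792 : Int))]))

-- ===== PRECONDITION & SPEC =====
def Spec_getNonTableRegions (diTbl : List (Int × List (Int × Int × Int × (Int × Int × Int × Int)))) (numPages : Int) (pgNum : Option Int) (out : List (Int × List (Int × Int × Int × Int))) : Prop := out = getNonTableRegions_alt diTbl numPages pgNum
instance (diTbl : List (Int × List (Int × Int × Int × (Int × Int × Int × Int)))) (numPages : Int) (pgNum : Option Int) (out : List (Int × List (Int × Int × Int × Int))) : Decidable (Spec_getNonTableRegions diTbl numPages pgNum out) := by unfold Spec_getNonTableRegions; infer_instance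

-- ===== CLAIM (what is proved, stated in full; the proofs are below) =====
def Claim_equal_getNonTableRegions : Prop := ∀ (diTbl : List (Int × List (Int × Int × Int × (Int × Int × Int × Int)))) (numPages : Int) (pgNum : Option Int), Dom_getNonTableRegions diTbl numPages pgNum → Spec_getNonTableRegions diTbl numPages pgNum (getNonTableRegions diTbl numPages pgNum)

-- ===== LEMMAS AND PROOFS =====

-- A's loop with a general accumulator equals B's recursion prefixed by the accumulator
theorem pvLoop_eq_cut (lst : List (Int × Int × Int × Int)) (acc : List (Int × Int × Int × Int)) (minY : Int) :
    (let st := lst.foldl (fun (st : List (Int × Int × Int × Int) × Int) r =>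
        (st.1 ++ [(0, max 0 (st.2 - 1), 612, min 792 (r.2.1 + 1))], r.2.2.2)) (acc, minY)
     st.1 ++ [(0, max 0 (st.2 - 1), 612, 792)])
    = acc ++ pvCut minY lst := by
  induction lst generalizing acc minY with
  | nil => simp [pvCut]
  | cons r t ih =>
      simp only [List.foldl_cons, pvCut]
      rw [ih]
      simp

theorem pvAInner_eq_pvCut (lst : List (Int × Int × Int × Int)) : pvAInner lst = pvCut 0 lst := by
  unfold pvAInner
  simp only [ite_self]
  exact pvLoop_eq_cut lst [] 0

-- ===== VERDICT (by name: the statement is the Claim_ definition above) =====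
theorem getNonTableRegions_spec : Claim_equal_getNonTableRegions := by
  intro diTbl numPages pgNum _
  unfold Spec_getNonTableRegions getNonTableRegions getNonTableRegions_alt
  simp only [List.map_map]
  have hmap : diTbl.map ((fun kv => (kv.1, pvAInner kv.2)) ∘
        (fun kv => (kv.1, PySem.List.sorted (kv.2.map (fun t => t.2.2.2)) (fun tup => tup.2.1) false)))
      = diTbl.map (fun kv => (kv.1, pvCut 0 (PySem.List.sorted (kv.2.map (fun t => t.2.2.2)) (fun r => r.2.1) false))) := by
    apply List.map_congr_left
    intro kv _
    simp [Function.comp, pvAInner_eq_pvCut]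
  rw [hmap]
  cases pgNum with
  | none => rfl
  | some p =>
      by_cases hp : diTbl.any (fun kv => kv.1 == p) = true
      · simp [hp, List.filterMap]
      · simp [hp, List.filterMap]
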